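-- pv_equiv track=rewrite | github.com/SamGrayson/AOC2025 | day2/main.py | invalid_finder
-- ===== SOURCE A (Python) =====
-- def invalid_finder(start, end):
--     invalid_ids = []
--     for num in range(start, end + 1):
--         str_num = str(num).lstrip("0")
--         midpoint = len(str_num) // 2
--
--         # Split the string into two halves
--         first_half = str_num[:midpoint]
--         second_half = str_num[midpoint:]
--
--         if first_half == second_half:
--             invalid_ids.append(num)
--
--     return invalid_ids
-- ===== SOURCE B (Python) =====
-- def invalid_finder(start, end):
--     # Closed-form enumeration: the qualifying numbers are 0 and exactly the
--     # integers h * (10**k + 1) where h has exactly k digits (no leading zero),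
--     # since their decimal string is the k-digit string of h written twice.
--     invalid_ids = [0] if start <= 0 <= end else []
--     if end > 0:
--         for k in range(1, len(str(end)) // 2 + 1):
--             p = 10 ** k + 1
--             lo = max(10 ** (k - 1), -(-start // p))   # ceil(start / p)
--             hi = min(10 ** k - 1, end // p)
--             invalid_ids.extend(h * p for h in range(lo, hi + 1))
--     return invalid_ids
-- ===== Notes on version B (the rewrite author's own statement) =====
-- stated objective: faster
-- what changed: Instead of scanning every number in [start, end] and comparing the two halves of its decimal string, B enumerates the answers directly in closed form: 0 plus h*(10^k+1) for every k-digit half h, clipped to [start, end] with floor/ceil division, so the work is proportional to the number of results (O(sqrt(end))) rather than to the width of the range.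
import Mathlib
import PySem

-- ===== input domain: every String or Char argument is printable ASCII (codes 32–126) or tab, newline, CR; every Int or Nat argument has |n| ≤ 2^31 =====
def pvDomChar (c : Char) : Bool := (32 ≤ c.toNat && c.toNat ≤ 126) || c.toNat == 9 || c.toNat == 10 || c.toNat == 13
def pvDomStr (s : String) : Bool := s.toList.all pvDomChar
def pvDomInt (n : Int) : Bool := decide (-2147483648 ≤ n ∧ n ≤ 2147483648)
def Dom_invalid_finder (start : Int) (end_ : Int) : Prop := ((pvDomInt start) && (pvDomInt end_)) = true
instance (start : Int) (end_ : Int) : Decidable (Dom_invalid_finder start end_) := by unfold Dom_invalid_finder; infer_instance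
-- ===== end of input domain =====

-- B replaces A's per-number scan of [start, end] with a direct enumeration of the
-- answers (0 and h*(10^k+1) for k-digit halves h, clipped to the range): asymptotically faster.


-- ===== PORT A =====
-- the loop body's test: str(num).lstrip("0"), split at len//2, compare halves.
-- `.lstrip("0")` has no PySem primitive; ported by hand as dropWhile (· == '0'),
-- exact: Python's lstrip(chars) removes exactly the longest prefix of chars from the set.
def pvHalvesEqual (num : Int) : Bool :=
  let str_num := (PySem.Int.toChars num).dropWhile (fun c => c == '0')
  let midpoint := PySem.Int.floordiv (str_num.length : Int) 2
  let first_half := PySem.List.slice str_num none (some midpoint)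
  let second_half := PySem.List.slice str_num (some midpoint) none
  first_half == second_half

def invalid_finder (start : Int) (end_ : Int) : List Int :=
  (PySem.List.pyRange start (end_ + 1) 1).foldl
    (fun invalid_ids num =>
      if pvHalvesEqual num then invalid_ids ++ [num] else invalid_ids) []

-- ===== PORT B =====
-- one block of B's k-loop: all h*(10^k+1) with h in [lo, hi]
def pvBlock (start : Int) (end_ : Int) (k : Int) : List Int :=
  let p : Int := 10 ^ k.toNat + 1
  let lo : Int := max (10 ^ (k - 1).toNat) (-(PySem.Int.floordiv (-start) p))
  let hi : Int := min (10 ^ k.toNat - 1) (PySem.Int.floordiv end_ p)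
  (PySem.List.pyRange lo (hi + 1) 1).map (fun h => h * p)

def invalid_finder_alt (start : Int) (end_ : Int) : List Int :=
  let invalid_ids : List Int := if start ≤ 0 ∧ 0 ≤ end_ then [0] else []
  if 0 < end_ then
    (PySem.List.pyRange 1
        (PySem.Int.floordiv ((PySem.Int.toChars end_).length : Int) 2 + 1) 1).foldl
      (fun invalid_ids k => invalid_ids ++ pvBlock start end_ k) invalid_ids
  else invalid_ids

-- ===== PRECONDITION & SPEC =====
def Spec_invalid_finder (start : Int) (end_ : Int) (out : List Int) : Prop := out = invalid_finder_alt start end_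
instance (start : Int) (end_ : Int) (out : List Int) : Decidable (Spec_invalid_finder start end_ out) := by unfold Spec_invalid_finder; infer_instance

-- ===== CLAIM (what is proved, stated in full; the proofs are below) =====
def Claim_equal_invalid_finder : Prop := ∀ (start : Int) (end_ : Int), Dom_invalid_finder start end_ → Spec_invalid_finder start end_ (invalid_finder start end_)

-- ===== LEMMAS AND PROOFS =====

def pvDstr (n : ℕ) : List Char := ((Nat.digits 10 n).map Nat.digitChar).reverse

theorem pv_tdc (f : ℕ) : ∀ (n : ℕ) (acc : List Char), 0 < n → n < 10 ^ f →
    Nat.toDigitsCore 10 f n acc = pvDstr n ++ acc := by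
  induction f with
  | zero => intro n acc hn h; omega
  | succ f ih =>
    intro n acc hn h
    rw [Nat.toDigitsCore]
    have hd : Nat.digits 10 n = n % 10 :: Nat.digits 10 (n / 10) := Nat.digits_def' (by norm_num) hn
    by_cases h0 : n / 10 = 0
    · simp [h0, pvDstr, hd]
    · rw [if_neg h0, ih (n / 10) _ (Nat.pos_of_ne_zero h0) (Nat.div_lt_of_lt_mul (by rw [pow_succ] at h; omega))]
      simp [pvDstr, hd]

theorem pv_toDigits_eq (n : ℕ) (hn : 0 < n) : Nat.toDigits 10 n = pvDstr n := by
  rw [Nat.toDigits, pv_tdc (n + 1) n [] hn (lt_trans (Nat.lt_pow_self (by norm_num)) (Nat.pow_lt_pow_right (by norm_num) (by omega)))]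
  simp

theorem pv_digitChar_inj : ∀ a < 10, ∀ b < 10, Nat.digitChar a = Nat.digitChar b → a = b := by decide

theorem pv_digitChar_ne_dash : ∀ a < 10, Nat.digitChar a ≠ '-' := by decide

theorem pv_digitChar_ne_zero : ∀ a < 10, a ≠ 0 → Nat.digitChar a ≠ '0' := by decide

theorem pv_map_digitChar_inj (l1 l2 : List ℕ) (h1 : ∀ x ∈ l1, x < 10) (h2 : ∀ x ∈ l2, x < 10)
    (h : l1.map Nat.digitChar = l2.map Nat.digitChar) : l1 = l2 := by
  induction l1 generalizing l2 with
  | nil => cases l2 <;> simp_all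
  | cons a t ih =>
    cases l2 with
    | nil => simp_all
    | cons b t2 =>
      simp only [List.map_cons, List.cons.injEq] at h
      have := pv_digitChar_inj a (h1 a (by simp)) b (h2 b (by simp)) h.1
      simp only [List.cons.injEq]
      refine ⟨this, ih t2 (fun x hx => h1 x (by simp [hx])) (fun x hx => h2 x (by simp [hx])) h.2⟩

-- the halves test on any list
theorem pv_halves_iff (s : List Char) :
    (s.take (s.length / 2) = s.drop (s.length / 2)) ↔ ∃ H, s = H ++ H := by
  constructor
  · intro h
    have hlen : (s.take (s.length / 2)).length = (s.drop (s.length / 2)).length := by rw [h]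
    simp only [List.length_take, List.length_drop] at hlen
    have hm : s.length = 2 * (s.length / 2) := by omega
    refine ⟨s.take (s.length / 2), ?_⟩
    conv_lhs => rw [← List.take_append_drop (s.length / 2) s]
    rw [h]
  · rintro ⟨H, rfl⟩
    have : (H ++ H).length / 2 = H.length := by simp; omega
    rw [this, List.take_left, List.drop_left]

theorem pv_digits_len_eq {k h : ℕ} (h1 : 10 ^ (k - 1) ≤ h) (h2 : h < 10 ^ k) (hk : 1 ≤ k) :
    (Nat.digits 10 h).length = k := by
  have ha : (Nat.digits 10 h).length ≤ k := (Nat.digits_length_le_iff (by norm_num) h).mpr h2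
  have hb : k - 1 < (Nat.digits 10 h).length := (Nat.lt_digits_length_iff (by norm_num) h).mpr h1
  omega

theorem pv_dstr_rep (m : ℕ) (hm : 0 < m) :
    (∃ H, pvDstr m = H ++ H) ↔
      ∃ k h : ℕ, 1 ≤ k ∧ 10 ^ (k - 1) ≤ h ∧ h < 10 ^ k ∧ m = h * (10 ^ k + 1) := by
  constructor
  · rintro ⟨H, hH⟩
    set d := Nat.digits 10 m with hd
    have hmap : d.map Nat.digitChar = H.reverse ++ H.reverse := by
      have := congrArg List.reverse hH
      simpa [pvDstr, ← hd] using this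
    set R := H.reverse with hR
    set m' := R.length with hm'
    have hdlen : d.length = 2 * m' := by
      have := congrArg List.length hmap
      simp at this; omega
    have hE : (d.take m').map Nat.digitChar = R := by
      rw [List.map_take, hmap, hm', List.take_left]
    have hF : (d.drop m').map Nat.digitChar = R := by
      rw [List.map_drop, hmap, hm', List.drop_left]
    have hlt : ∀ x ∈ d, x < 10 := fun x hx => Nat.digits_lt_base (by norm_num) hx
    have hEF : d.take m' = d.drop m' :=
      pv_map_digitChar_inj _ _ (fun x hx => hlt x (List.mem_of_mem_take hx))
        (fun x hx => hlt x (List.mem_of_mem_drop hx)) (hE.trans hF.symm)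
    have hsplit : d = d.take m' ++ d.take m' := by
      conv_lhs => rw [← List.take_append_drop m' d]
      rw [hEF]
    set E := d.take m' with hEdef
    have hm'pos : 1 ≤ m' := by
      have : d ≠ [] := Nat.digits_ne_nil_iff_ne_zero.mpr (by omega)
      have : 0 < d.length := List.length_pos_iff.mpr this
      omega
    have hElen : E.length = m' := by
      simp [hEdef, List.length_take]; omega
    have hElast : ∀ hne : E ≠ [], E.getLast hne ≠ 0 := by
      intro hne
      have hdlast := Nat.getLast_digit_ne_zero 10 (m := m) (by omega)
      have hdne : d ≠ [] := Nat.digits_ne_nil_iff_ne_zero.mpr (by omega)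
      have hEEne : E ++ E ≠ [] := by simp [hne]
      have step1 : d.getLast hdne = (E ++ E).getLast hEEne := List.getLast_congr _ _ hsplit
      have step2 : (E ++ E).getLast hEEne = E.getLast hne := by
        rw [List.getLast_append]
        simp [hne]
      rw [step1, step2] at hdlast
      exact hdlast
    have hEd : Nat.digits 10 (Nat.ofDigits 10 E) = E :=
      Nat.digits_ofDigits 10 (by norm_num) E
        (fun x hx => hlt x (List.mem_of_mem_take hx)) hElast
    set h := Nat.ofDigits 10 E with hhdef
    refine ⟨m', h, hm'pos, ?_, ?_, ?_⟩
    · have : m' - 1 < (Nat.digits 10 h).length := by rw [hEd, hElen]; omega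
      exact (Nat.lt_digits_length_iff (by norm_num) h).mp this
    · have : (Nat.digits 10 h).length ≤ m' := by rw [hEd, hElen]
      exact (Nat.digits_length_le_iff (by norm_num) h).mp this
    · have : m = Nat.ofDigits 10 d := (Nat.ofDigits_digits 10 m).symm
      rw [this, hsplit, Nat.ofDigits_append, hElen, ← hhdef]
      ring
  · rintro ⟨k, h, hk, h1, h2, rfl⟩
    have hh0 : h ≠ 0 := by
      have : 0 < 10 ^ (k - 1) := Nat.pow_pos (by norm_num)
      omega
    set E := Nat.digits 10 h with hE
    have hElen : E.length = k := pv_digits_len_eq h1 h2 hk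
    have hEne : E ≠ [] := Nat.digits_ne_nil_iff_ne_zero.mpr hh0
    have hlt : ∀ x ∈ E ++ E, x < 10 := by
      intro x hx
      rcases List.mem_append.mp hx with hx | hx <;> exact Nat.digits_lt_base (by norm_num) hx
    have hlast : ∀ hne : E ++ E ≠ [], (E ++ E).getLast hne ≠ 0 := by
      intro hne
      rw [List.getLast_append]
      simp [hEne]
      exact Nat.getLast_digit_ne_zero 10 hh0
    have hof : Nat.ofDigits 10 (E ++ E) = h * (10 ^ k + 1) := by
      rw [Nat.ofDigits_append, hElen]
      have : Nat.ofDigits 10 E = h := by rw [hE]; exact_mod_cast Nat.ofDigits_digits 10 h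
      rw [this]; ring
    have hdig : Nat.digits 10 (h * (10 ^ k + 1)) = E ++ E := by
      rw [← hof]
      exact Nat.digits_ofDigits 10 (by norm_num) _ hlt hlast
    refine ⟨((E.map Nat.digitChar).reverse : List Char), ?_⟩
    rw [pvDstr, hdig, List.map_append, List.reverse_append]

def pvGood (n : Int) : Prop :=
  n = 0 ∨ ∃ k h : ℕ, 1 ≤ k ∧ 10 ^ (k - 1) ≤ h ∧ h < 10 ^ k ∧ n = (h : Int) * (10 ^ k + 1)

theorem pv_dstr_len_pos (m : ℕ) (hm : 0 < m) : 0 < (pvDstr m).length := by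
  have : Nat.digits 10 m ≠ [] := Nat.digits_ne_nil_iff_ne_zero.mpr (by omega)
  simp [pvDstr]
  exact List.length_pos_iff.mpr this

theorem pv_dstr_mem (c : Char) (m : ℕ) (hc : c ∈ pvDstr m) : ∃ d < 10, c = Nat.digitChar d := by
  simp only [pvDstr, List.mem_reverse, List.mem_map] at hc
  obtain ⟨d, hd, rfl⟩ := hc
  exact ⟨d, Nat.digits_lt_base (by norm_num) hd, rfl⟩

theorem pv_dropWhile_dstr (m : ℕ) (hm : 0 < m) :
    (pvDstr m).dropWhile (fun c => c == '0') = pvDstr m := by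
  rw [List.dropWhile_eq_self_iff]
  intro hl
  have hlen := pv_dstr_len_pos m hm
  have hdne : Nat.digits 10 m ≠ [] := Nat.digits_ne_nil_iff_ne_zero.mpr (by omega)
  have hget : (pvDstr m)[0] = Nat.digitChar ((Nat.digits 10 m).getLast hdne) := by
    simp only [pvDstr, List.getElem_reverse, List.getElem_map, List.getLast_eq_getElem]
    congr 1
    simp
  rw [hget]
  have hlast := Nat.getLast_digit_ne_zero 10 (m := m) (by omega)
  have hlt : (Nat.digits 10 m).getLast hdne < 10 :=
    Nat.digits_lt_base (by norm_num) (List.getLast_mem hdne)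
  simpa using pv_digitChar_ne_zero _ hlt hlast

theorem pv_mid_eq (L : ℕ) : PySem.Int.floordiv (L : Int) 2 = ((L / 2 : ℕ) : Int) := by
  exact_mod_cast PySem.Int.floordiv_natCast L 2

theorem pvHalvesEqual_iff (n : Int) : pvHalvesEqual n = true ↔ pvGood n := by
  rcases lt_trichotomy n 0 with hneg | rfl | hpos
  · -- negative: both sides false
    constructor
    · intro h
      exfalso
      unfold pvHalvesEqual at h
      dsimp only at h
      rw [PySem.Int.toChars, if_pos hneg] at h
      have ha : 0 < n.natAbs := by omega
      rw [pv_toDigits_eq _ ha] at h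
      set a := n.natAbs
      have hdw : ('-' :: pvDstr a).dropWhile (fun c => c == '0') = '-' :: pvDstr a := by
        simp
      rw [hdw] at h
      set s := '-' :: pvDstr a with hs
      set L := s.length with hL
      rw [pv_mid_eq L, PySem.List.slice_to_natCast, PySem.List.slice_from_natCast] at h
      have heq : s.take (L / 2) = s.drop (L / 2) := by simpa using h
      have hla : 0 < (pvDstr a).length := pv_dstr_len_pos a ha
      have hLval : L = (pvDstr a).length + 1 := by simp [hL, hs]
      have hlen := congrArg List.length heq
      simp only [List.length_take, List.length_drop] at hlen
      have hm1 : 1 ≤ L / 2 := by omega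
      have h0 := congrArg (fun l => l[0]?) heq
      simp only [List.getElem?_take, List.getElem?_drop] at h0
      rw [if_pos (by omega)] at h0
      have hs0 : s[0]? = some '-' := by simp [hs]
      have hsm : s[(L / 2) + 0]? = (pvDstr a)[(L / 2) - 1]? := by
        rw [hs]
        have : L / 2 + 0 = (L / 2 - 1) + 1 := by omega
        rw [this]
        simp
      rw [hs0, hsm] at h0
      have hsome : ∃ c, (pvDstr a)[(L / 2) - 1]? = some c := by
        have : L / 2 - 1 < (pvDstr a).length := by omega
        exact ⟨_, List.getElem?_eq_getElem this⟩
      obtain ⟨c, hc⟩ := hsome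
      rw [hc] at h0
      have hmem : c ∈ pvDstr a := List.mem_of_getElem? hc
      obtain ⟨d, hd, rfl⟩ := pv_dstr_mem c a hmem
      exact pv_digitChar_ne_dash d hd (Option.some.inj h0.symm)
    · intro h
      exfalso
      rcases h with h | ⟨k, h, hk, h1, h2, hn⟩
      · omega
      · have : (0:Int) ≤ (h : Int) * (10 ^ k + 1) := by positivity
        omega
  · constructor
    · intro _; exact Or.inl rfl
    · intro _; decide
  · -- positive
    unfold pvHalvesEqual
    dsimp only
    rw [PySem.Int.toChars, if_neg (by omega)]
    have ha : 0 < n.toNat := by omega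
    rw [pv_toDigits_eq _ ha, pv_dropWhile_dstr _ ha]
    set s := pvDstr n.toNat with hs
    rw [pv_mid_eq s.length, PySem.List.slice_to_natCast, PySem.List.slice_from_natCast]
    rw [beq_iff_eq, pv_halves_iff, pv_dstr_rep _ ha]
    unfold pvGood
    constructor
    · rintro ⟨k, h, hk, h1, h2, hm⟩
      refine Or.inr ⟨k, h, hk, h1, h2, ?_⟩
      have hcast : ((h * (10 ^ k + 1) : ℕ) : ℤ) = (h : ℤ) * (10 ^ k + 1) := by push_cast; ring
      omega
    · rintro (h | ⟨k, h, hk, h1, h2, hn⟩)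
      · omega
      · refine ⟨k, h, hk, h1, h2, ?_⟩
        have hcast : ((h * (10 ^ k + 1) : ℕ) : ℤ) = (h : ℤ) * (10 ^ k + 1) := by push_cast; ring
        omega

theorem pv_mem_block (start end_ k : Int) (hk : 1 ≤ k) (x : Int) :
    x ∈ pvBlock start end_ k ↔
      ∃ hh : Int, (10:ℤ) ^ (k.toNat - 1) ≤ hh ∧ hh < 10 ^ k.toNat ∧
        start ≤ hh * (10 ^ k.toNat + 1) ∧ hh * (10 ^ k.toNat + 1) ≤ end_ ∧
        x = hh * (10 ^ k.toNat + 1) := by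
  unfold pvBlock
  dsimp only
  have hp : (0:ℤ) < 10 ^ k.toNat + 1 := by positivity
  have hk1 : (k - 1).toNat = k.toNat - 1 := by omega
  rw [hk1]
  simp only [List.mem_map, PySem.List.mem_pyRange_one]
  have hceil : ∀ hh : ℤ,
      (-(PySem.Int.floordiv (-start) (10 ^ k.toNat + 1)) ≤ hh) ↔ start ≤ hh * (10 ^ k.toNat + 1) := by
    intro hh
    rw [neg_le, PySem.Int.le_floordiv_iff_mul_le hp, neg_mul, neg_le_neg_iff]
  have hfloor : ∀ hh : ℤ,
      hh ≤ PySem.Int.floordiv end_ (10 ^ k.toNat + 1) ↔ hh * (10 ^ k.toNat + 1) ≤ end_ :=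
    fun hh => PySem.Int.le_floordiv_iff_mul_le hp
  constructor
  · rintro ⟨hh, ⟨hlo, hhi⟩, rfl⟩
    rw [max_le_iff] at hlo
    have hhi' := le_min_iff.mp (by omega : hh ≤ min ((10:ℤ) ^ k.toNat - 1) (PySem.Int.floordiv end_ (10 ^ k.toNat + 1)))
    exact ⟨hh, hlo.1, by omega, (hceil hh).mp hlo.2, (hfloor hh).mp hhi'.2, rfl⟩
  · rintro ⟨hh, h1, h2, h3, h4, rfl⟩
    refine ⟨hh, ⟨max_le_iff.mpr ⟨h1, (hceil hh).mpr h3⟩, ?_⟩, rfl⟩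
    have := (hfloor hh).mpr h4
    have : hh ≤ min ((10:ℤ) ^ k.toNat - 1) (PySem.Int.floordiv end_ (10 ^ k.toNat + 1)) :=
      le_min_iff.mpr ⟨by omega, this⟩
    omega

theorem pv_alt_eq (start end_ : Int) (h : 0 < end_) :
    invalid_finder_alt start end_ =
      (if start ≤ 0 ∧ 0 ≤ end_ then [0] else []) ++
        (PySem.List.pyRange 1
          (PySem.Int.floordiv ((PySem.Int.toChars end_).length : Int) 2 + 1) 1).flatMap
          (pvBlock start end_) := by
  unfold invalid_finder_alt
  dsimp only
  rw [if_pos h, PySem.List.foldl_append_eq_flatMap]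

theorem pv_len_toChars (end_ : Int) (h : 0 < end_) :
    (PySem.Int.toChars end_).length = (Nat.digits 10 end_.toNat).length := by
  rw [PySem.Int.toChars, if_neg (by omega), pv_toDigits_eq _ (by omega)]
  simp [pvDstr]

theorem pv_x_pos {k h : ℕ} (h1 : 10 ^ (k - 1) ≤ h) : (0:ℤ) < (h:ℤ) * (10 ^ k + 1) := by
  have hh1 : 0 < h := lt_of_lt_of_le (Nat.one_le_pow _ _ (by norm_num)) h1
  have hp : (0:ℤ) < 10 ^ k + 1 := by positivity
  exact mul_pos (by exact_mod_cast hh1) hp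

theorem pv_x_lb {k h : ℕ} (hk : 1 ≤ k) (h1 : 10 ^ (k - 1) ≤ h) :
    10 ^ (2 * k - 1) ≤ h * (10 ^ k + 1) := by
  calc 10 ^ (2 * k - 1) = 10 ^ (k - 1) * 10 ^ k := by rw [← pow_add]; congr 1; omega
  _ ≤ h * (10 ^ k + 1) := Nat.mul_le_mul h1 (by omega)

theorem pv_mem_alt (start end_ x : Int) :
    x ∈ invalid_finder_alt start end_ ↔
      (x = 0 ∧ start ≤ 0 ∧ 0 ≤ end_) ∨
      ∃ k h : ℕ, 1 ≤ k ∧ 10 ^ (k - 1) ≤ h ∧ h < 10 ^ k ∧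
        x = (h:ℤ) * (10 ^ k + 1) ∧ start ≤ x ∧ x ≤ end_ := by
  have hres0 : ∀ y : Int, y ∈ (if start ≤ 0 ∧ 0 ≤ end_ then ([0]:List Int) else []) ↔
      (y = 0 ∧ start ≤ 0 ∧ 0 ≤ end_) := by
    intro y; split_ifs with hc <;> simp_all
  by_cases hend : 0 < end_
  · rw [pv_alt_eq start end_ hend, List.mem_append, List.mem_flatMap, hres0]
    have hM : PySem.Int.floordiv ((PySem.Int.toChars end_).length : Int) 2 =
        (((Nat.digits 10 end_.toNat).length / 2 : ℕ) : ℤ) := by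
      rw [pv_len_toChars end_ hend, pv_mid_eq]
    set Ld := (Nat.digits 10 end_.toNat).length with hLd
    constructor
    · rintro (h0 | ⟨kI, hkI, hblk⟩)
      · exact Or.inl h0
      · rw [PySem.List.mem_pyRange_one] at hkI
        have hk1 : 1 ≤ kI := hkI.1
        rw [pv_mem_block start end_ kI hk1 x] at hblk
        obtain ⟨hh, b1, b2, b3, b4, rfl⟩ := hblk
        set k := kI.toNat with hkdef
        have c1 : (((10:ℕ) ^ (k - 1) : ℕ) : ℤ) = (10:ℤ) ^ (k - 1) := by push_cast; rfl
        have c2 : (((10:ℕ) ^ k : ℕ) : ℤ) = (10:ℤ) ^ k := by push_cast; rfl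
        have hone : (1:ℤ) ≤ (10:ℤ) ^ (k - 1) := one_le_pow₀ (by norm_num)
        have hhpos : 0 < hh := by omega
        have hheq : hh = (hh.toNat : ℤ) := by omega
        refine Or.inr ⟨k, hh.toNat, by omega, by omega, by omega, by rw [← hheq], b3, b4⟩
    · rintro (h0 | ⟨k, h, hk, h1, h2, hxeq, hxlo, hxhi⟩)
      · exact Or.inl h0
      · refine Or.inr ⟨(k:ℤ), ?_, ?_⟩
        · rw [PySem.List.mem_pyRange_one]
          have hxlb : ((10:ℕ) ^ (2 * k - 1) : ℕ) ≤ end_.toNat := by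
            have := pv_x_lb hk h1
            have hxInt : ((h * (10 ^ k + 1) : ℕ) : ℤ) = x := by push_cast; rw [hxeq]
            omega
          have hlen : 2 * k - 1 < Ld :=
            (Nat.lt_digits_length_iff (by norm_num) _).mpr hxlb
          rw [hM]
          constructor
          · exact_mod_cast Nat.one_le_cast.mpr hk
          · have : k ≤ Ld / 2 := by omega
            omega
        · rw [pv_mem_block start end_ (k:ℤ) (by exact_mod_cast hk) x]
          refine ⟨(h:ℤ), ?_, ?_, ?_, ?_, ?_⟩
          · simp only [Int.toNat_natCast]; exact_mod_cast h1
          · simp only [Int.toNat_natCast]; exact_mod_cast h2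
          · simp only [Int.toNat_natCast]; rw [← hxeq]; exact hxlo
          · simp only [Int.toNat_natCast]; rw [← hxeq]; exact hxhi
          · simp only [Int.toNat_natCast]; exact hxeq
  · unfold invalid_finder_alt
    dsimp only
    rw [if_neg hend, hres0]
    constructor
    · exact Or.inl
    · rintro (h0 | ⟨k, h, hk, h1, h2, hxeq, hxlo, hxhi⟩)
      · exact h0
      · exfalso
        have := pv_x_pos h1
        omega

theorem pv_block_pairwise (start end_ k : Int) :
    (pvBlock start end_ k).Pairwise (· < ·) := by
  unfold pvBlock
  dsimp only
  have hp : (0:ℤ) < 10 ^ k.toNat + 1 := by positivity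
  refine List.Pairwise.map _ ?_ (PySem.List.pairwise_lt_pyRange_one _ _)
  intro a b hab
  exact mul_lt_mul_of_pos_right hab hp

theorem pv_block_mem_bounds {start end_ k x : Int} (hk : 1 ≤ k) (hx : x ∈ pvBlock start end_ k) :
    (10:ℤ) ^ (2 * k.toNat - 1) ≤ x ∧ x ≤ 10 ^ (2 * k.toNat) - 1 := by
  rw [pv_mem_block start end_ k hk x] at hx
  obtain ⟨hh, b1, b2, _, _, rfl⟩ := hx
  set m := k.toNat with hm
  have hm1 : 1 ≤ m := by omega
  have hppos : (0:ℤ) < 10 ^ m + 1 := by positivity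
  constructor
  · calc (10:ℤ) ^ (2 * m - 1) = 10 ^ (m - 1) * 10 ^ m := by rw [← pow_add]; congr 1; omega
    _ ≤ hh * (10 ^ m + 1) := by
        have h10 : (0:ℤ) ≤ 10 ^ (m - 1) := by positivity
        have : (10:ℤ) ^ m ≤ 10 ^ m + 1 := by omega
        have hhnn : (0:ℤ) ≤ hh := le_trans h10 b1
        exact mul_le_mul b1 this (by positivity) hhnn
  · have : hh * (10 ^ m + 1) ≤ (10 ^ m - 1) * (10 ^ m + 1) :=
      mul_le_mul_of_nonneg_right (by omega) (le_of_lt hppos)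
    calc hh * (10 ^ m + 1) ≤ (10 ^ m - 1) * (10 ^ m + 1) := this
    _ = 10 ^ (2 * m) - 1 := by rw [two_mul, pow_add]; ring

theorem pv_alt_pairwise (start end_ : Int) :
    (invalid_finder_alt start end_).Pairwise (· < ·) := by
  by_cases hend : 0 < end_
  · rw [pv_alt_eq start end_ hend]
    rw [List.pairwise_append]
    refine ⟨by split_ifs <;> simp, ?_, ?_⟩
    · rw [List.pairwise_flatMap]
      refine ⟨fun k _ => pv_block_pairwise start end_ k, ?_⟩
      rw [List.pairwise_iff_getElem]
      intro i j hi hj hij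
      simp only [PySem.List.getElem_pyRange_one]
      intro x hx y hy
      have hki : (1:ℤ) ≤ 1 + (i:ℤ) := by omega
      have hkj : (1:ℤ) ≤ 1 + (j:ℤ) := by omega
      have hbi := pv_block_mem_bounds hki hx
      have hbj := pv_block_mem_bounds hkj hy
      have hmono : (10:ℤ) ^ (2 * (1 + (i:ℤ)).toNat) ≤ 10 ^ (2 * (1 + (j:ℤ)).toNat - 1) :=
        pow_le_pow_right₀ (by norm_num) (by omega)
      omega
    · intro x hx y hy
      have hx0 : x = 0 := by revert hx; split_ifs <;> simp_all
      rw [List.mem_flatMap] at hy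
      obtain ⟨k, hk, hyb⟩ := hy
      rw [PySem.List.mem_pyRange_one] at hk
      have := (pv_block_mem_bounds hk.1 hyb).1
      have h1 : (1:ℤ) ≤ (10:ℤ) ^ (2 * k.toNat - 1) := one_le_pow₀ (by norm_num)
      omega
  · unfold invalid_finder_alt
    dsimp only
    rw [if_neg hend]
    split_ifs <;> simp

theorem pv_final : ∀ (start end_ : Int),
    invalid_finder start end_ = invalid_finder_alt start end_ := by
  intro start end_
  have hA : invalid_finder start end_ =
      (PySem.List.pyRange start (end_ + 1) 1).filter pvHalvesEqual := by
    unfold invalid_finder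
    rw [PySem.List.foldl_append_if_eq_filter, List.nil_append]
  rw [hA]
  have hpw1 : ((PySem.List.pyRange start (end_ + 1) 1).filter pvHalvesEqual).Pairwise (· < ·) :=
    List.Pairwise.filter _ (PySem.List.pairwise_lt_pyRange_one _ _)
  have hpw2 := pv_alt_pairwise start end_
  have hmem : ∀ a : Int, a ∈ (PySem.List.pyRange start (end_ + 1) 1).filter pvHalvesEqual ↔
      a ∈ invalid_finder_alt start end_ := by
    intro a
    rw [List.mem_filter, PySem.List.mem_pyRange_one, pv_mem_alt, pvHalvesEqual_iff]
    unfold pvGood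
    constructor
    · rintro ⟨⟨hlo, hhi⟩, h0 | ⟨k, h, hk, h1, h2, heq⟩⟩
      · exact Or.inl ⟨h0, by omega, by omega⟩
      · exact Or.inr ⟨k, h, hk, h1, h2, heq, hlo, by omega⟩
    · rintro (⟨rfl, hlo, hhi⟩ | ⟨k, h, hk, h1, h2, heq, hlo, hhi⟩)
      · exact ⟨⟨hlo, by omega⟩, Or.inl rfl⟩
      · exact ⟨⟨hlo, by omega⟩, Or.inr ⟨k, h, hk, h1, h2, heq⟩⟩
  have hnd1 : ((PySem.List.pyRange start (end_ + 1) 1).filter pvHalvesEqual).Nodup :=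
    hpw1.imp ne_of_lt
  have hnd2 : (invalid_finder_alt start end_).Nodup := hpw2.imp ne_of_lt
  exact List.Perm.eq_of_pairwise (fun a b _ _ h1 h2 => absurd h2 (lt_asymm h1)) hpw1 hpw2
    ((List.perm_ext_iff_of_nodup hnd1 hnd2).mpr hmem)

-- ===== VERDICT (by name: the statement is the Claim_ definition above) =====
theorem invalid_finder_spec : Claim_equal_invalid_finder := by
  unfold Claim_equal_invalid_finder Spec_invalid_finder
  exact fun start end_ _ => pv_final start end_
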